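-- pv_equiv track=rewrite | github.com/Ag3497120/verantyx-v6 | arc/world_commands.py | erode_color
-- ===== SOURCE A (Python) =====
-- from collections import Counter, defaultdict
--
-- def _bg(g):
--     c = Counter()
--     for row in g: c.update(row)
--     return c.most_common(1)[0][0]
--
-- def _copy(g):
--     return [row[:] for row in g]
--
-- def erode_color(g, color):
--     """特定色だけ侵食"""
--     h,w=len(g),len(g[0]); bg=_bg(g); res=_copy(g)
--     for r in range(h):
--         for c in range(w):
--             if g[r][c]==color:
--                 for dr,dc in [(-1,0),(1,0),(0,-1),(0,1)]:
--                     nr,nc=r+dr,c+dc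
--                     if not(0<=nr<h and 0<=nc<w) or g[nr][nc]!=color:
--                         res[r][c]=bg; break
--     return res
-- ===== SOURCE B (Python) =====
-- from collections import Counter
--
-- def _bg(g):
--     c = Counter()
--     for row in g: c.update(row)
--     return c.most_common(1)[0][0]
--
-- def erode_color(g, color):
--     """特定色だけ侵食 (border/horizontal/vertical scans + apply pass)"""
--     h, w = len(g), len(g[0])
--     bg = _bg(g)
--     erode = set()
--     # cells of the colour on the outer border
--     for c in range(w):
--         if g[0][c] == color: erode.add((0, c))
--         if g[h-1][c] == color: erode.add((h-1, c))
--     for r in range(h):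
--         if g[r][0] == color: erode.add((r, 0))
--         if g[r][w-1] == color: erode.add((r, w-1))
--     # horizontally adjacent differing pairs
--     for r in range(h):
--         for c in range(w-1):
--             a, b = g[r][c], g[r][c+1]
--             if a != b:
--                 if a == color: erode.add((r, c))
--                 if b == color: erode.add((r, c+1))
--     # vertically adjacent differing pairs
--     for r in range(h-1):
--         for c in range(w):
--             a, b = g[r][c], g[r+1][c]
--             if a != b:
--                 if a == color: erode.add((r, c))
--                 if b == color: erode.add((r+1, c))
--     return [[bg if (r, c) in erode else v for c, v in enumerate(row)]
--             for r, row in enumerate(g)]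
-- ===== Notes on version B (the rewrite author's own statement) =====
-- stated objective: alternative
-- what changed: Replaces the per-cell 4-neighbour scan with early break by three independent linear passes (border marking, horizontally adjacent differing pairs, vertically adjacent differing pairs) that collect an erode set, followed by one apply pass that rewrites exactly those cells to bg.
-- outside the precondition, e.g. on erode_color([[], [1]], 1): A returns [[], [1]], B raises IndexError
import Mathlib
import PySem

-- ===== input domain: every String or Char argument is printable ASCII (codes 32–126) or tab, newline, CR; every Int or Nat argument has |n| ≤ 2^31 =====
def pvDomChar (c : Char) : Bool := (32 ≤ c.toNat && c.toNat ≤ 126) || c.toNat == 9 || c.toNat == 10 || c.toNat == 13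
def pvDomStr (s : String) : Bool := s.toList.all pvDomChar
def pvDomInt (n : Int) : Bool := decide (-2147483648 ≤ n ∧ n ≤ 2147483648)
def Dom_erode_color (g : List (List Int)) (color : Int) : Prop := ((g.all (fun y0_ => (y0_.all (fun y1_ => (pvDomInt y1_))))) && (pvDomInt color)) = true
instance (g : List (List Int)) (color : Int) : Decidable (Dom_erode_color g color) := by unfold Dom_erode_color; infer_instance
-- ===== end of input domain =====

-- B restates A's per-cell neighbour scan as border/horizontal/vertical pair scans building an erode set, then one apply pass (objective: alternative decomposition, same cost).

-- ===== PORT A =====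
-- _bg, shared by both Pythons: Counter over the rows, then most_common(1)[0][0]
-- (most_common(1) = first element of the items sorted by count descending, stable;
--  headD's default is the totalizing guard for the IndexError on an empty counter, excluded by Pre_)
def pvBg (g : List (List Int)) : Int :=
  let cnt := g.foldl (fun d row => row.foldl (fun d x => PySem.Dict.modify d x 0 (· + 1)) d)
    (PySem.Dict.empty : PySem.Dict Int Int)
  ((PySem.List.sorted cnt.items (fun p => p.2) true).headD ((0 : Int), (0 : Int))).1

-- g[r][c] for the in-range nonnegative indices both Pythons use (defaults are dead under Pre_)
def pvCell (g : List (List Int)) (r c : Nat) : Int := (g.getD r []).getD c 0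

-- A's inner for-with-break over the four deltas: it fires iff some delta is out of bounds or differs
def pvFail (g : List (List Int)) (color : Int) (h w : Nat) (r c : Nat) : Bool :=
  [((-1 : Int), (0 : Int)), (1, 0), (0, -1), (0, 1)].any (fun d =>
    let nr := (r : Int) + d.1
    let nc := (c : Int) + d.2
    if 0 ≤ nr ∧ nr < (h : Int) ∧ 0 ≤ nc ∧ nc < (w : Int) then
      pvCell g nr.toNat nc.toNat != color
    else true)

def erode_color (g : List (List Int)) (color : Int) : List (List Int) :=
  let h := g.length
  let w := (g.headD []).length
  let bg := pvBg g
  let res0 := g.map (fun row => row)   -- _copy: [row[:] for row in g]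
  (List.range h).foldl (fun res r =>
    (List.range w).foldl (fun res c =>
      if pvCell g r c = color then
        if pvFail g color h w r c then res.set r ((res.getD r []).set c bg) else res
      else res) res) res0

-- ===== PORT B =====
def erode_color_alt (g : List (List Int)) (color : Int) : List (List Int) :=
  let h := g.length
  let w := (g.headD []).length
  let bg := pvBg g
  let s1 := (List.range w).foldl (fun s c =>
      let s := if pvCell g 0 c = color then PySem.Set.add s (0, c) else s
      if pvCell g (h - 1) c = color then PySem.Set.add s (h - 1, c) else s)
    (PySem.Set.empty : PySem.Set (Nat × Nat))
  let s2 := (List.range h).foldl (fun s r =>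
      let s := if pvCell g r 0 = color then PySem.Set.add s (r, 0) else s
      if pvCell g r (w - 1) = color then PySem.Set.add s (r, w - 1) else s) s1
  let s3 := (List.range h).foldl (fun s r =>
      (List.range (w - 1)).foldl (fun s c =>
        let a := pvCell g r c
        let b := pvCell g r (c + 1)
        if a ≠ b then
          let s := if a = color then PySem.Set.add s (r, c) else s
          if b = color then PySem.Set.add s (r, c + 1) else s
        else s) s) s2
  let s4 := (List.range (h - 1)).foldl (fun s r =>
      (List.range w).foldl (fun s c =>
        let a := pvCell g r c
        let b := pvCell g (r + 1) c
        if a ≠ b then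
          let s := if a = color then PySem.Set.add s (r, c) else s
          if b = color then PySem.Set.add s (r + 1, c) else s
        else s) s) s3
  g.zipIdx.map (fun p => p.1.zipIdx.map (fun q =>
    if PySem.Set.contains s4 (p.2, q.2) then bg else q.1))

-- ===== PRECONDITION & SPEC =====
-- Pre_ admits every input A accepts except the degenerate shape with an empty first row but a
-- later nonempty row (there w = len(g[0]) = 0, A's loops never run and it returns a plain copy,
-- while B's border scan indexes g[r][0] and raises IndexError); on the empty grid, on grids whose
-- rows are all empty and on ragged grids with a row shorter than the first, A itself raises IndexError.
def Pre_erode_color (g : List (List Int)) (color : Int) : Prop :=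
  g ≠ [] ∧ (g.headD []) ≠ [] ∧ ∀ row ∈ g, (g.headD []).length ≤ row.length
instance (g : List (List Int)) (color : Int) : Decidable (Pre_erode_color g color) := by
  unfold Pre_erode_color; infer_instance
def pvWitness_erode_color : List (List Int) × Int := ([[1, 2], [2, 2]], 1)
def Spec_erode_color (g : List (List Int)) (color : Int) (out : List (List Int)) : Prop := out = erode_color_alt g color
instance (g : List (List Int)) (color : Int) (out : List (List Int)) : Decidable (Spec_erode_color g color out) := by unfold Spec_erode_color; infer_instance

-- ===== CLAIM (what is proved, stated in full; the proofs are below) =====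
def Claim_equal_erode_color : Prop := ∀ (g : List (List Int)) (color : Int), Dom_erode_color g color → Pre_erode_color g color → Spec_erode_color g color (erode_color g color)

-- ===== LEMMAS AND PROOFS =====

-- the common pointwise description both ports are proved equal to
def pvTarget (g : List (List Int)) (color : Int) : List (List Int) :=
  g.zipIdx.map (fun p => p.1.zipIdx.map (fun q =>
    if q.2 < (g.headD []).length ∧ pvCell g p.2 q.2 = color ∧
        pvFail g color g.length (g.headD []).length p.2 q.2 = true then pvBg g
    else q.1))

lemma pv_set_getD_self (res : List (List Int)) (r : Nat) : res.set r (res.getD r []) = res := by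
  apply List.ext_getElem
  · simp
  · intro i h1 h2
    simp only [List.getElem_set]
    split
    · next heq => subst heq; rw [List.getD_eq_getElem _ _ (by simpa using h2)]
    · rfl

lemma pv_getD_set_self (res : List (List Int)) (r c : Nat) (v : Int) :
    (res.set r ((res.getD r []).set c v)).getD r [] = (res.getD r []).set c v := by
  by_cases hr : r < res.length
  · rw [List.getD_eq_getElem _ _ (by simpa using hr)]
    simp
  · rw [List.getD_eq_default _ _ (by simpa using hr), List.getD_eq_default _ _ (by omega)]
    simp

lemma pv_inner (bg : Int) (p : Nat → Bool) (r : Nat) :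
    ∀ (L : List Nat) (res : List (List Int)),
    L.foldl (fun res c => if p c then res.set r ((res.getD r []).set c bg) else res) res
      = res.set r (L.foldl (fun row c => if p c then row.set c bg else row) (res.getD r [])) := by
  intro L
  induction L with
  | nil => intro res; exact (pv_set_getD_self res r).symm
  | cons c L ih =>
    intro res
    simp only [List.foldl_cons]
    by_cases hc : p c
    · simp only [hc, if_pos]
      rw [ih, pv_getD_set_self, List.set_set]
    · simp only [hc, Bool.false_eq_true, if_false]
      rw [ih]

lemma pv_outer_length (f : Nat → List Int → List Int) (g0 : List (List Int)) (n : Nat) :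
    ((List.range n).foldl (fun res r => res.set r (f r (res.getD r []))) g0).length = g0.length := by
  induction n with
  | zero => simp
  | succ n ih =>
    rw [List.range_succ, List.foldl_append, List.foldl_cons, List.foldl_nil, List.length_set]
    exact ih

lemma pv_outer_getD (f : Nat → List Int → List Int) (g0 : List (List Int)) (n : Nat) :
    n ≤ g0.length → ∀ r : Nat,
    ((List.range n).foldl (fun res r => res.set r (f r (res.getD r []))) g0).getD r []
      = if r < n then f r (g0.getD r []) else g0.getD r [] := by
  induction n with
  | zero => intro _ r; simp
  | succ n ih =>
    intro hn r
    have hn' : n ≤ g0.length := by omega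
    have hlen := pv_outer_length f g0 n
    rw [List.range_succ, List.foldl_append, List.foldl_cons, List.foldl_nil]
    have hgetn := ih hn' n
    rw [if_neg (lt_irrefl n)] at hgetn
    rw [hgetn]
    by_cases hr : r = n
    · subst hr
      rw [List.getD_eq_getElem _ _ (by rw [List.length_set, hlen]; omega)]
      simp
    · rw [List.getD_eq_getElem?_getD, List.getElem?_set_ne (Ne.symm hr),
        ← List.getD_eq_getElem?_getD, ih hn' r]
      by_cases hlt : r < n
      · rw [if_pos hlt, if_pos (by omega)]
      · rw [if_neg hlt, if_neg (by omega)]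

lemma pv_rowfold_length (p : Nat → Bool) (bg : Int) :
    ∀ (L : List Nat) (row : List Int),
    (L.foldl (fun row c => if p c then row.set c bg else row) row).length = row.length := by
  intro L
  induction L with
  | nil => intro row; rfl
  | cons c L ih =>
    intro row
    simp only [List.foldl_cons]
    by_cases hc : p c
    · rw [hc, if_pos rfl, ih, List.length_set]
    · simp only [hc, Bool.false_eq_true, if_false]; exact ih row

lemma pv_rowfold_getD (p : Nat → Bool) (bg : Int) (row : List Int) (n : Nat) :
    n ≤ row.length → ∀ c : Nat,
    ((List.range n).foldl (fun row c => if p c then row.set c bg else row) row).getD c 0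
      = if c < n ∧ p c then bg else row.getD c 0 := by
  induction n with
  | zero => intro _ c; simp
  | succ n ih =>
    intro hn c
    have hn' : n ≤ row.length := by omega
    have hlen := pv_rowfold_length p bg (List.range n) row
    rw [List.range_succ, List.foldl_append, List.foldl_cons, List.foldl_nil]
    by_cases hp : p n
    · rw [hp, if_pos rfl]
      by_cases hc : c = n
      · subst hc
        rw [List.getD_eq_getElem _ _ (by rw [List.length_set, hlen]; omega)]
        simp [hp]
      · rw [List.getD_eq_getElem?_getD, List.getElem?_set_ne (Ne.symm hc),
          ← List.getD_eq_getElem?_getD, ih hn' c]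
        by_cases hpc : p c
        · by_cases hlt : c < n
          · rw [if_pos ⟨hlt, hpc⟩, if_pos ⟨by omega, hpc⟩]
          · rw [if_neg (by tauto), if_neg (by rintro ⟨h1, -⟩; omega)]
        · rw [if_neg (by tauto), if_neg (by tauto)]
    · simp only [hp, Bool.false_eq_true, if_false]
      rw [ih hn' c]
      by_cases hpc : p c
      · by_cases hlt : c < n
        · rw [if_pos ⟨hlt, hpc⟩, if_pos ⟨by omega, hpc⟩]
        · rw [if_neg (by tauto), if_neg ?_]
          rintro ⟨h1, -⟩
          rcases Nat.lt_succ_iff_lt_or_eq.mp h1 with h | h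
          · exact hlt h
          · subst h; exact absurd hpc hp
      · rw [if_neg (by tauto), if_neg (by tauto)]

lemma pv_nested_if (P : Prop) [Decidable P] (q : Bool) {α : Type} (x y : α) :
    (if P then (if q then x else y) else y) = if decide P && q then x else y := by
  by_cases hP : P <;> by_cases hq : q <;> simp [hP, hq]

theorem erode_color_eq_target (g : List (List Int)) (color : Int)
    (hpre : Pre_erode_color g color) :
    erode_color g color = pvTarget g color := by
  obtain ⟨hne, hne0, hrect⟩ := hpre
  unfold erode_color
  set h := g.length with hh
  set w := (g.headD []).length with hw
  set bg := pvBg g with hbg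
  set p : Nat → Nat → Bool := fun r c => decide (pvCell g r c = color) && pvFail g color h w r c with hp
  have hres0 : g.map (fun row => row) = g := by simp
  rw [hres0]
  have hstep : ∀ (res : List (List Int)) (r : Nat),
      (List.range w).foldl (fun res c =>
        if pvCell g r c = color then
          (if pvFail g color h w r c then res.set r ((res.getD r []).set c bg) else res)
        else res) res
      = res.set r ((List.range w).foldl (fun row c => if p r c then row.set c bg else row) (res.getD r [])) := by
    intro res r
    rw [List.foldl_ext _ (fun (res : List (List Int)) (c : Nat) => if p r c then res.set r ((res.getD r []).set c bg) else res)
      _ (fun res c _ => pv_nested_if _ _ _ _)]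
    exact pv_inner bg (p r) r (List.range w) res
  rw [List.foldl_ext _ (fun (res : List (List Int)) (r : Nat) => res.set r ((List.range w).foldl
      (fun row c => if p r c then row.set c bg else row) (res.getD r []))) _
      (fun res r _ => hstep res r)]
  have hlen := pv_outer_length (fun r row => (List.range w).foldl (fun row c => if p r c then row.set c bg else row) row) g h
  have hget := pv_outer_getD (fun r row => (List.range w).foldl (fun row c => if p r c then row.set c bg else row) row) g h (le_refl _)
  simp only [] at hlen hget
  apply List.ext_getElem
  · rw [hlen]; simp [pvTarget]
  · intro r h1 h2
    have hr : r < h := by rw [hlen] at h1; exact h1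
    have hrowlen : w ≤ (g.getD r []).length := by
      rw [List.getD_eq_getElem _ _ (by omega)]
      exact hrect _ (List.getElem_mem _)
    rw [← List.getD_eq_getElem _ ([] : List Int) h1, hget r, if_pos hr]
    simp only [pvTarget, List.getElem_map, List.getElem_zipIdx]
    have hrlen := pv_rowfold_length (p r) bg (List.range w) (g.getD r [])
    have hrget := pv_rowfold_getD (p r) bg (g.getD r []) w hrowlen
    apply List.ext_getElem
    · rw [hrlen]
      simp only [List.length_zipIdx, List.length_map]
      rw [List.getD_eq_getElem _ _ (by omega)]
    · intro c hc1 hc2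
      have hclen : c < (g.getD r []).length := by rw [← hrlen]; exact hc1
      rw [← List.getD_eq_getElem _ (0 : Int) hc1, hrget c]
      simp only [List.getElem_map, List.getElem_zipIdx]
      have hev : (g.getD r []).getD c 0 = (g[r]'(by omega))[c]'(by simpa using hc2) := by
        have h1 : g.getD r [] = g[r]'(by omega) := List.getD_eq_getElem _ _ (by omega)
        rw [h1]
        exact List.getD_eq_getElem _ _ (by simpa using hc2)
      have hcond : (c < w ∧ p r c = true) ↔
          (0 + c < w ∧ pvCell g (0 + r) (0 + c) = color ∧ pvFail g color h w (0 + r) (0 + c) = true) := by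
        simp [hp]
      rw [if_congr hcond rfl hev]

lemma pv_mem_foldl {α β : Type} (step : List α → β → List α) (A : β → α → Prop)
    (hstep : ∀ s i x, x ∈ step s i ↔ x ∈ s ∨ A i x) :
    ∀ (L : List β) (s : List α) (x : α), x ∈ L.foldl step s ↔ x ∈ s ∨ ∃ i ∈ L, A i x := by
  intro L
  induction L with
  | nil => intro s x; simp
  | cons i L ih =>
    intro s x
    rw [List.foldl_cons, ih, hstep]
    simp only [List.mem_cons]
    constructor
    · rintro ((h | h) | ⟨j, hj, h⟩)
      · exact Or.inl h
      · exact Or.inr ⟨i, Or.inl rfl, h⟩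
      · exact Or.inr ⟨j, Or.inr hj, h⟩
    · rintro (h | ⟨j, (rfl | hj), h⟩)
      · exact Or.inl (Or.inl h)
      · exact Or.inl (Or.inr h)
      · exact Or.inr ⟨j, hj, h⟩

def pvS1 (g : List (List Int)) (color : Int) (h w : Nat) : List (Nat × Nat) :=
  (List.range w).foldl (fun s c =>
      let s := if pvCell g 0 c = color then PySem.Set.add s (0, c) else s
      if pvCell g (h - 1) c = color then PySem.Set.add s (h - 1, c) else s)
    (PySem.Set.empty : PySem.Set (Nat × Nat))

def pvS2 (g : List (List Int)) (color : Int) (h w : Nat) : List (Nat × Nat) :=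
  (List.range h).foldl (fun s r =>
      let s := if pvCell g r 0 = color then PySem.Set.add s (r, 0) else s
      if pvCell g r (w - 1) = color then PySem.Set.add s (r, w - 1) else s)
    (pvS1 g color h w)

def pvS3 (g : List (List Int)) (color : Int) (h w : Nat) : List (Nat × Nat) :=
  (List.range h).foldl (fun s r =>
      (List.range (w - 1)).foldl (fun s c =>
        let a := pvCell g r c
        let b := pvCell g r (c + 1)
        if a ≠ b then
          let s := if a = color then PySem.Set.add s (r, c) else s
          if b = color then PySem.Set.add s (r, c + 1) else s
        else s) s)
    (pvS2 g color h w)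

def pvS4 (g : List (List Int)) (color : Int) (h w : Nat) : List (Nat × Nat) :=
  (List.range (h - 1)).foldl (fun s r =>
      (List.range w).foldl (fun s c =>
        let a := pvCell g r c
        let b := pvCell g (r + 1) c
        if a ≠ b then
          let s := if a = color then PySem.Set.add s (r, c) else s
          if b = color then PySem.Set.add s (r + 1, c) else s
        else s) s)
    (pvS3 g color h w)

lemma pv_alt_eq (g : List (List Int)) (color : Int) :
    erode_color_alt g color = g.zipIdx.map (fun p => p.1.zipIdx.map (fun q =>
      if PySem.Set.contains (pvS4 g color g.length (g.headD []).length) (p.2, q.2) then pvBg g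
      else q.1)) := rfl

lemma pv_mem_S1 (g : List (List Int)) (color : Int) (h w : Nat) (x : Nat × Nat) :
    x ∈ pvS1 g color h w ↔ ∃ c < w,
      (pvCell g 0 c = color ∧ x = (0, c)) ∨
      (pvCell g (h - 1) c = color ∧ x = (h - 1, c)) := by
  unfold pvS1
  rw [pv_mem_foldl _ (fun c x =>
      (pvCell g 0 c = color ∧ x = (0, c)) ∨
      (pvCell g (h - 1) c = color ∧ x = (h - 1, c)))]
  · simp [PySem.Set.empty, List.mem_range]
  · intro s i x
    by_cases h1 : pvCell g 0 i = color <;> by_cases h2 : pvCell g (h - 1) i = color <;>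
      simp [h1, h2, PySem.Set.mem_add] <;> tauto

lemma pv_mem_S2 (g : List (List Int)) (color : Int) (h w : Nat) (x : Nat × Nat) :
    x ∈ pvS2 g color h w ↔ x ∈ pvS1 g color h w ∨ ∃ r < h,
      (pvCell g r 0 = color ∧ x = (r, 0)) ∨
      (pvCell g r (w - 1) = color ∧ x = (r, w - 1)) := by
  unfold pvS2
  rw [pv_mem_foldl _ (fun r x =>
      (pvCell g r 0 = color ∧ x = (r, 0)) ∨
      (pvCell g r (w - 1) = color ∧ x = (r, w - 1)))]
  · simp [List.mem_range]
  · intro s i x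
    by_cases h1 : pvCell g i 0 = color <;> by_cases h2 : pvCell g i (w - 1) = color <;>
      simp [h1, h2, PySem.Set.mem_add] <;> tauto

lemma pv_pairstep_mem (g : List (List Int)) (color : Int) (r1 c1 r2 c2 : Nat)
    (s : List (Nat × Nat)) (x : Nat × Nat) :
    (x ∈ (if pvCell g r1 c1 ≠ pvCell g r2 c2 then
          let s := if pvCell g r1 c1 = color then PySem.Set.add s (r1, c1) else s
          if pvCell g r2 c2 = color then PySem.Set.add s (r2, c2) else s
        else s)) ↔ x ∈ s ∨ (pvCell g r1 c1 ≠ pvCell g r2 c2 ∧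
          ((pvCell g r1 c1 = color ∧ x = (r1, c1)) ∨ (pvCell g r2 c2 = color ∧ x = (r2, c2)))) := by
  split_ifs <;> simp [PySem.Set.mem_add] <;> tauto

lemma pv_mem_S3 (g : List (List Int)) (color : Int) (h w : Nat) (x : Nat × Nat) :
    x ∈ pvS3 g color h w ↔ x ∈ pvS2 g color h w ∨ ∃ r < h, ∃ c < w - 1,
      pvCell g r c ≠ pvCell g r (c + 1) ∧
      ((pvCell g r c = color ∧ x = (r, c)) ∨ (pvCell g r (c + 1) = color ∧ x = (r, c + 1))) := by
  unfold pvS3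
  rw [pv_mem_foldl _ (fun r x => ∃ c < w - 1,
      pvCell g r c ≠ pvCell g r (c + 1) ∧
      ((pvCell g r c = color ∧ x = (r, c)) ∨ (pvCell g r (c + 1) = color ∧ x = (r, c + 1))))]
  · simp [List.mem_range]
  · intro s i x
    rw [pv_mem_foldl _ (fun c x =>
        pvCell g i c ≠ pvCell g i (c + 1) ∧
        ((pvCell g i c = color ∧ x = (i, c)) ∨ (pvCell g i (c + 1) = color ∧ x = (i, c + 1))))]
    · simp [List.mem_range]
    · intro s c x
      exact pv_pairstep_mem g color i c i (c + 1) s x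

lemma pv_mem_S4 (g : List (List Int)) (color : Int) (h w : Nat) (x : Nat × Nat) :
    x ∈ pvS4 g color h w ↔ x ∈ pvS3 g color h w ∨ ∃ r < h - 1, ∃ c < w,
      pvCell g r c ≠ pvCell g (r + 1) c ∧
      ((pvCell g r c = color ∧ x = (r, c)) ∨ (pvCell g (r + 1) c = color ∧ x = (r + 1, c))) := by
  unfold pvS4
  rw [pv_mem_foldl _ (fun r x => ∃ c < w,
      pvCell g r c ≠ pvCell g (r + 1) c ∧
      ((pvCell g r c = color ∧ x = (r, c)) ∨ (pvCell g (r + 1) c = color ∧ x = (r + 1, c))))]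
  · simp [List.mem_range]
  · intro s i x
    rw [pv_mem_foldl _ (fun c x =>
        pvCell g i c ≠ pvCell g (i + 1) c ∧
        ((pvCell g i c = color ∧ x = (i, c)) ∨ (pvCell g (i + 1) c = color ∧ x = (i + 1, c))))]
    · simp [List.mem_range]
    · intro s c x
      exact pv_pairstep_mem g color i c (i + 1) c s x

lemma pv_fail_iff (g : List (List Int)) (color : Int) (h w r c : Nat)
    (hr : r < h) (hc : c < w) :
    pvFail g color h w r c = true ↔
      (r = 0 ∨ r + 1 = h ∨ c = 0 ∨ c + 1 = w ∨
       pvCell g (r - 1) c ≠ color ∨ pvCell g (r + 1) c ≠ color ∨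
       pvCell g r (c - 1) ≠ color ∨ pvCell g r (c + 1) ≠ color) := by
  unfold pvFail
  simp only [List.any_cons, List.any_nil, Bool.or_eq_true, Bool.or_false]
  have pv_ite_iff : ∀ (P : Prop) [Decidable P] (x color : Int),
      ((if P then (x != color) else true) = true) ↔ (¬ P ∨ x ≠ color) := by
    intro P _ x color; by_cases hP : P <;> simp [hP]
  rw [pv_ite_iff, pv_ite_iff, pv_ite_iff, pv_ite_iff]
  have e1 : ((r : Int) + -1).toNat = r - 1 := by omega
  have e2 : ((r : Int) + 1).toNat = r + 1 := by omega
  have e3 : ((c : Int) + -1).toNat = c - 1 := by omega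
  have e4 : ((c : Int) + 1).toNat = c + 1 := by omega
  have e5 : ((r : Int) + 0).toNat = r := by omega
  have e6 : ((c : Int) + 0).toNat = c := by omega
  rw [e1, e2, e3, e4, e5, e6]
  have q1 : ¬(0 ≤ (r : Int) + -1 ∧ (r : Int) + -1 < (h : Int) ∧ 0 ≤ (c : Int) + 0 ∧ (c : Int) + 0 < (w : Int)) ↔ r = 0 := by omega
  have q2 : ¬(0 ≤ (r : Int) + 1 ∧ (r : Int) + 1 < (h : Int) ∧ 0 ≤ (c : Int) + 0 ∧ (c : Int) + 0 < (w : Int)) ↔ r + 1 = h := by omega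
  have q3 : ¬(0 ≤ (r : Int) + 0 ∧ (r : Int) + 0 < (h : Int) ∧ 0 ≤ (c : Int) + -1 ∧ (c : Int) + -1 < (w : Int)) ↔ c = 0 := by omega
  have q4 : ¬(0 ≤ (r : Int) + 0 ∧ (r : Int) + 0 < (h : Int) ∧ 0 ≤ (c : Int) + 1 ∧ (c : Int) + 1 < (w : Int)) ↔ c + 1 = w := by omega
  rw [q1, q2, q3, q4]
  constructor
  · rintro ((h|h)|(h|h)|(h|h)|(h|h))
    · exact Or.inl h
    · exact Or.inr (Or.inr (Or.inr (Or.inr (Or.inl h))))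
    · exact Or.inr (Or.inl h)
    · exact Or.inr (Or.inr (Or.inr (Or.inr (Or.inr (Or.inl h)))))
    · exact Or.inr (Or.inr (Or.inl h))
    · exact Or.inr (Or.inr (Or.inr (Or.inr (Or.inr (Or.inr (Or.inl h))))))
    · exact Or.inr (Or.inr (Or.inr (Or.inl h)))
    · exact Or.inr (Or.inr (Or.inr (Or.inr (Or.inr (Or.inr (Or.inr h))))))
  · rintro (h|h|h|h|h|h|h|h)
    · exact Or.inl (Or.inl h)
    · exact Or.inr (Or.inl (Or.inl h))
    · exact Or.inr (Or.inr (Or.inl (Or.inl h)))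
    · exact Or.inr (Or.inr (Or.inr (Or.inl h)))
    · exact Or.inl (Or.inr h)
    · exact Or.inr (Or.inl (Or.inr h))
    · exact Or.inr (Or.inr (Or.inl (Or.inr h)))
    · exact Or.inr (Or.inr (Or.inr (Or.inr h)))

lemma pv_mem_S4_iff (g : List (List Int)) (color : Int) (h w r c : Nat)
    (hr : r < h) (hc : c < w) :
    ((r, c) ∈ pvS4 g color h w) ↔
      (pvCell g r c = color ∧ pvFail g color h w r c = true) := by
  rw [pv_mem_S4, pv_mem_S3, pv_mem_S2, pv_mem_S1, pv_fail_iff g color h w r c hr hc]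
  constructor
  · rintro (((⟨c', hc', (⟨hcol, heq⟩ | ⟨hcol, heq⟩)⟩ |
        ⟨r', hr', (⟨hcol, heq⟩ | ⟨hcol, heq⟩)⟩) |
        ⟨r', hr', c', hc', hne, (⟨hcol, heq⟩ | ⟨hcol, heq⟩)⟩) |
        ⟨r', hr', c', hc', hne, (⟨hcol, heq⟩ | ⟨hcol, heq⟩)⟩) <;>
      rw [Prod.mk.injEq] at heq <;> obtain ⟨he1, he2⟩ := heq <;> subst he1 <;> subst he2
    · exact ⟨hcol, Or.inl rfl⟩
    · exact ⟨hcol, Or.inr (Or.inl (by omega))⟩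
    · exact ⟨hcol, Or.inr (Or.inr (Or.inl rfl))⟩
    · exact ⟨hcol, Or.inr (Or.inr (Or.inr (Or.inl (by omega))))⟩
    · -- horizontal pair, left endpoint: right neighbour differs
      exact ⟨hcol, Or.inr (Or.inr (Or.inr (Or.inr (Or.inr (Or.inr (Or.inr
        (fun hb => hne (by rw [hcol, hb]))))))))⟩
    · -- horizontal pair, right endpoint: left neighbour differs
      have e : c' + 1 - 1 = c' := by omega
      refine ⟨hcol, Or.inr (Or.inr (Or.inr (Or.inr (Or.inr (Or.inr (Or.inl ?_))))))⟩
      rw [e]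
      exact fun ha => hne (by rw [ha, hcol])
    · -- vertical pair, top endpoint: lower neighbour differs
      exact ⟨hcol, Or.inr (Or.inr (Or.inr (Or.inr (Or.inr (Or.inl
        (fun hb => hne (by rw [hcol, hb])))))))⟩
    · -- vertical pair, bottom endpoint: upper neighbour differs
      have e : r' + 1 - 1 = r' := by omega
      refine ⟨hcol, Or.inr (Or.inr (Or.inr (Or.inr (Or.inl ?_))))⟩
      rw [e]
      exact fun ha => hne (by rw [ha, hcol])
  · rintro ⟨hcol, (h0 | h1 | h2 | h3 | h4 | h5 | h6 | h7)⟩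
    · subst h0
      exact Or.inl (Or.inl (Or.inl ⟨c, hc, Or.inl ⟨hcol, rfl⟩⟩))
    · have e : h - 1 = r := by omega
      exact Or.inl (Or.inl (Or.inl ⟨c, hc, Or.inr ⟨by rw [e]; exact hcol, by rw [e]⟩⟩))
    · subst h2
      exact Or.inl (Or.inl (Or.inr ⟨r, hr, Or.inl ⟨hcol, rfl⟩⟩))
    · have e : w - 1 = c := by omega
      exact Or.inl (Or.inl (Or.inr ⟨r, hr, Or.inr ⟨by rw [e]; exact hcol, by rw [e]⟩⟩))
    · -- upper neighbour differs
      by_cases hz : r = 0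
      · subst hz; exact Or.inl (Or.inl (Or.inl ⟨c, hc, Or.inl ⟨hcol, rfl⟩⟩))
      · have e : r - 1 + 1 = r := by omega
        refine Or.inr ⟨r - 1, by omega, c, hc, ?_, Or.inr ⟨by rw [e]; exact hcol, by rw [e]⟩⟩
        rw [e]
        exact fun he => h4 (he.trans hcol)
    · -- lower neighbour differs
      by_cases hz : r + 1 = h
      · exact Or.inl (Or.inl (Or.inl ⟨c, hc, Or.inr ⟨by rw [show h - 1 = r by omega]; exact hcol,
          by rw [show h - 1 = r by omega]⟩⟩))
      · exact Or.inr ⟨r, by omega, c, hc, fun he => h5 (he.symm.trans hcol), Or.inl ⟨hcol, rfl⟩⟩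
    · -- left neighbour differs
      by_cases hz : c = 0
      · subst hz; exact Or.inl (Or.inl (Or.inr ⟨r, hr, Or.inl ⟨hcol, rfl⟩⟩))
      · have e : c - 1 + 1 = c := by omega
        refine Or.inl (Or.inr ⟨r, hr, c - 1, by omega, ?_, Or.inr ⟨by rw [e]; exact hcol, by rw [e]⟩⟩)
        rw [e]
        exact fun he => h6 (he.trans hcol)
    · -- right neighbour differs
      by_cases hz : c + 1 = w
      · exact Or.inl (Or.inl (Or.inr ⟨r, hr, Or.inr ⟨by rw [show w - 1 = c by omega]; exact hcol,
          by rw [show w - 1 = c by omega]⟩⟩))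
      · exact Or.inl (Or.inr ⟨r, hr, c, by omega, fun he => h7 (he.symm.trans hcol), Or.inl ⟨hcol, rfl⟩⟩)

lemma pv_not_mem_S4 (g : List (List Int)) (color : Int) (h w r c : Nat)
    (hw : 1 ≤ w) (hc : w ≤ c) : (r, c) ∉ pvS4 g color h w := by
  rw [pv_mem_S4, pv_mem_S3, pv_mem_S2, pv_mem_S1]
  rintro (((⟨c', hc', (⟨-, heq⟩ | ⟨-, heq⟩)⟩ |
      ⟨r', hr', (⟨-, heq⟩ | ⟨-, heq⟩)⟩) |
      ⟨r', hr', c', hc', -, (⟨-, heq⟩ | ⟨-, heq⟩)⟩) |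
      ⟨r', hr', c', hc', -, (⟨-, heq⟩ | ⟨-, heq⟩)⟩) <;>
    rw [Prod.mk.injEq] at heq <;> omega

lemma pv_contains_iff (g : List (List Int)) (color : Int) (h w r c : Nat)
    (hr : r < h) (hw : 1 ≤ w) :
    (PySem.Set.contains (pvS4 g color h w) (r, c) = true) ↔
      (c < w ∧ pvCell g r c = color ∧ pvFail g color h w r c = true) := by
  rw [PySem.Set.contains_iff]
  by_cases hc : c < w
  · rw [pv_mem_S4_iff g color h w r c hr hc]
    tauto
  · constructor
    · intro hmem
      exact absurd hmem (pv_not_mem_S4 g color h w r c hw (by omega))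
    · rintro ⟨hcw, -⟩
      exact absurd hcw hc

theorem erode_color_alt_eq_target (g : List (List Int)) (color : Int)
    (hpre : Pre_erode_color g color) :
    erode_color_alt g color = pvTarget g color := by
  obtain ⟨hne, hne0, -⟩ := hpre
  have hw1 : 1 ≤ (g.headD []).length := List.length_pos_iff.mpr hne0
  rw [pv_alt_eq]
  unfold pvTarget
  apply List.ext_getElem
  · simp
  · intro r h1 h2
    simp only [List.getElem_map, List.getElem_zipIdx]
    apply List.ext_getElem
    · simp
    · intro c hc1 hc2
      simp only [List.getElem_map, List.getElem_zipIdx]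
      have hr : (0 + r) < g.length := by simpa using h1
      have hcont := pv_contains_iff g color g.length (g.headD []).length (0 + r) (0 + c) hr hw1
      rw [if_congr hcont rfl rfl]
-- ===== VERDICT (by name: the statement is the Claim_ definition above) =====
theorem erode_color_spec : Claim_equal_erode_color := by
  intro g color _ hpre
  unfold Spec_erode_color
  rw [erode_color_eq_target g color hpre, erode_color_alt_eq_target g color hpre]
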